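-- pv_equiv track=rewrite | github.com/LuJunru/TranCLR | code/utils.py | map_span_to_event
-- ===== SOURCE A (Python) =====
-- def map_span_to_event(pred, event):
--     pred_event = [0] * len(event)
--     match_pred_tok, in_span = -1, 0
--     for i, (p, e) in enumerate(zip(pred, event)):
--         if p == 1:
--             if e == 1:
--                 match_pred_tok = i
--                 pred_event[i] = 1
--             in_span = 1
--         else:
--             # spacial case: was in span, but no matched event tok
--             if in_span and match_pred_tok == -1:
--                 pred_event[i-1] = 1
--             match_pred_tok, in_span = -1, 0
--
--     # termination corner case: last tok in span, but no matched event tok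
--     if in_span and match_pred_tok == -1:
--         pred_event[i] = 1
--
--     return pred_event
-- ===== SOURCE B (Python) =====
-- def map_span_to_event(pred, event):
--     pairs = list(zip(pred, event))
--     out = [0] * len(event)
--     n = len(pairs)
--     i = 0
--     while i < n:
--         if pairs[i][0] != 1:
--             i += 1
--             continue
--         s = i
--         while i < n and pairs[i][0] == 1:
--             i += 1
--         # span is [s, i): a maximal run of pred == 1
--         if any(e == 1 for _, e in pairs[s:i]):
--             for j in range(s, i):
--                 if pairs[j][1] == 1:
--                     out[j] = 1
--         else:
--             out[i - 1] = 1
--     return out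
-- ===== Notes on version B (the rewrite author's own statement) =====
-- stated objective: alternative
-- what changed: Replaces A's incremental in_span/match_pred_tok state machine with an explicit segment decomposition: scan to each maximal pred==1 run, then mark all event-matching indices in the run, or the run's last index if it has none.
import Mathlib
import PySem

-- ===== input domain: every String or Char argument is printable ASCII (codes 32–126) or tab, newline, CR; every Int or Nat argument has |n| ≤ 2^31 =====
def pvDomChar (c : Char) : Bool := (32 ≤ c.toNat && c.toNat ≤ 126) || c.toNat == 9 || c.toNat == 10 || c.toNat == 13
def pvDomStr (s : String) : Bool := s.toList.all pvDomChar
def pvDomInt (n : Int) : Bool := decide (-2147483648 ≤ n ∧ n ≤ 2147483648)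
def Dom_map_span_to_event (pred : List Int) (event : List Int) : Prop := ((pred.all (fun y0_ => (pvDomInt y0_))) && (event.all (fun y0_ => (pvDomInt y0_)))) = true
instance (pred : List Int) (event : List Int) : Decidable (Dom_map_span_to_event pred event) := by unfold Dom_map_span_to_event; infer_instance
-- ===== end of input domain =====

-- B replaces A's incremental in_span/match_pred_tok state machine by an explicit
-- segment decomposition (scan each maximal pred==1 run as a chunk); objective: alternative.

-- ===== PORT A =====
-- A's for-loop over enumerate(zip(pred, event)) carrying (i, match_pred_tok, in_span, pred_event);
-- the empty-list base case performs A's post-loop corner fix (i there is the NEXT index, so A's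
-- final `pred_event[i]` — the last enumerate value — is `i - 1` here; in_span = 0 initially, so
-- the fix never fires on an empty zip, exactly as in Python).
def loopA : List (Int × Int) → Nat → Int → Int → List Int → List Int
  | [], i, m, s, acc => if s = 1 ∧ m = -1 then acc.set (i - 1) 1 else acc
  | (p, e) :: rest, i, m, s, acc =>
    if p = 1 then
      loopA rest (i + 1) (if e = 1 then (i : Int) else m) 1
        (if e = 1 then acc.set i 1 else acc)
    else
      loopA rest (i + 1) (-1) 0
        (if s = 1 ∧ m = -1 then acc.set (i - 1) 1 else acc)

def map_span_to_event (pred : List Int) (event : List Int) : List Int :=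
  loopA (pred.zip event) 0 (-1) 0 (List.replicate event.length 0)

-- ===== PORT B =====
-- `for j in range(s, i): if pairs[j][1] == 1: out[j] = 1` over one run
def runWrite : List (Int × Int) → Nat → List Int → List Int
  | [], _, acc => acc
  | (_, e) :: r, i, acc => runWrite r (i + 1) (if e = 1 then acc.set i 1 else acc)

-- Source B's outer while loop: skip non-1 preds; on a run head, take the whole maximal run,
-- process it as a chunk, continue after it.
def loopB : List (Int × Int) → Nat → List Int → List Int
  | [], _, acc => acc
  | (p, e) :: rest, i, acc =>
    if p ≠ 1 then loopB rest (i + 1) acc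
    else
      let run := ((p, e) :: rest).takeWhile (fun pe => pe.1 == 1)
      let rest' := ((p, e) :: rest).dropWhile (fun pe => pe.1 == 1)
      let acc' := if ((p, e) :: rest |>.takeWhile (fun pe => pe.1 == 1)).any (fun pe => pe.2 == 1)
                  then runWrite run i acc
                  else acc.set (i + run.length - 1) 1
      loopB rest' (i + run.length) acc'
termination_by l => l.length
decreasing_by
  · simp
  · simp only [List.dropWhile]
    have hp : p = 1 := by omega
    simp [hp]
    exact List.length_dropWhile_le _ _

def map_span_to_event_alt (pred : List Int) (event : List Int) : List Int :=
  loopB (pred.zip event) 0 (List.replicate event.length 0)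

-- ===== PRECONDITION & SPEC =====
def Spec_map_span_to_event (pred : List Int) (event : List Int) (out : List Int) : Prop := out = map_span_to_event_alt pred event
instance (pred : List Int) (event : List Int) (out : List Int) : Decidable (Spec_map_span_to_event pred event out) := by unfold Spec_map_span_to_event; infer_instance

-- ===== CLAIM (what is proved, stated in full; the proofs are below) =====
def Claim_equal_map_span_to_event : Prop := ∀ (pred : List Int) (event : List Int), Dom_map_span_to_event pred event → Spec_map_span_to_event pred event (map_span_to_event pred event)

-- ===== LEMMAS AND PROOFS =====

-- last matched index A would record over a run
def lm : List (Int × Int) → Nat → Int → Int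
  | [], _, m => m
  | (_, e) :: r, i, m => lm r (i + 1) (if e = 1 then (i : Int) else m)

theorem lm_nonneg : ∀ (r : List (Int × Int)) (i : Nat) (m : Int), 0 ≤ m → 0 ≤ lm r i m := by
  intro r
  induction r with
  | nil => intro i m h; simpa [lm] using h
  | cons a r ih =>
    intro i m h
    simp only [lm]
    split
    · exact ih _ _ (Int.natCast_nonneg i)
    · exact ih _ _ h

theorem lm_no_match : ∀ (r : List (Int × Int)) (i : Nat) (m : Int),
    r.any (fun pe => pe.2 == 1) = false → lm r i m = m := by
  intro r
  induction r with
  | nil => intro i m _; rfl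
  | cons a r ih =>
    intro i m h
    simp only [List.any_cons, Bool.or_eq_false_iff, beq_eq_false_iff_ne] at h
    simp only [lm, if_neg h.1]
    exact ih _ _ h.2

theorem lm_match : ∀ (r : List (Int × Int)) (i : Nat) (m : Int),
    r.any (fun pe => pe.2 == 1) = true → 0 ≤ lm r i m := by
  intro r
  induction r with
  | nil => intro i m h; simp at h
  | cons a r ih =>
    intro i m h
    simp only [lm]
    by_cases he : a.2 = 1
    · rw [if_pos he]; exact lm_nonneg _ _ _ (Int.natCast_nonneg i)
    · rw [if_neg he]
      have hb : (a.2 == 1) = false := by simpa using he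
      rw [List.any_cons, hb, Bool.false_or] at h
      exact ih _ _ h

theorem runWrite_no_match : ∀ (r : List (Int × Int)) (i : Nat) (acc : List Int),
    r.any (fun pe => pe.2 == 1) = false → runWrite r i acc = acc := by
  intro r
  induction r with
  | nil => intro i acc _; rfl
  | cons a r ih =>
    intro i acc h
    simp only [List.any_cons, Bool.or_eq_false_iff, beq_eq_false_iff_ne] at h
    simp only [runWrite, if_neg h.1]
    exact ih _ _ h.2

-- A's loop across a run of pred == 1 pairs, in one step
theorem loopA_run : ∀ (run : List (Int × Int)), run.all (fun pe => pe.1 == 1) = true →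
    ∀ (rest : List (Int × Int)) (i : Nat) (m : Int) (s : Int) (acc : List Int),
    loopA (run ++ rest) i m s acc =
      loopA rest (i + run.length) (lm run i m) (if run.isEmpty then s else 1) (runWrite run i acc) := by
  intro run
  induction run with
  | nil => intro _ rest i m s acc; simp [lm, runWrite]
  | cons a r ih =>
    intro h rest i m s acc
    simp only [List.all_cons, Bool.and_eq_true, beq_iff_eq] at h
    obtain ⟨hp, hr⟩ := h
    obtain ⟨p, e⟩ := a
    simp only at hp
    simp only [List.cons_append, loopA]
    rw [if_pos hp, ih hr]
    simp only [lm, runWrite, List.length_cons, List.isEmpty_cons, ite_self,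
      Bool.false_eq_true, if_false]
    have harith : i + 1 + r.length = i + (r.length + 1) := by omega
    rw [harith]

-- whole-list equivalence of the two loops (A entered between runs: m = -1, s = 0)
theorem loopA_eq_loopB : ∀ (N : Nat) (l : List (Int × Int)), l.length ≤ N →
    ∀ (i : Nat) (acc : List Int), loopA l i (-1) 0 acc = loopB l i acc := by
  intro N
  induction N with
  | zero =>
    intro l hl i acc
    have : l = [] := List.length_eq_zero_iff.mp (Nat.le_zero.mp hl)
    subst this
    simp [loopA, loopB]
  | succ N ih =>
    intro l hl i acc
    match l with
    | [] => simp [loopA, loopB]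
    | (p, e) :: rest =>
      by_cases hp : p = 1
      · -- head of a run: split off the maximal run
        set q : Int × Int → Bool := fun pe => pe.1 == 1 with hq
        set run := ((p, e) :: rest).takeWhile q with hrun
        set rest' := ((p, e) :: rest).dropWhile q with hrest'
        have hsplit : run ++ rest' = (p, e) :: rest := List.takeWhile_append_dropWhile
        have hall : run.all q = true := List.all_takeWhile
        have hrun_cons : run = (p, e) :: rest.takeWhile q := by
          simp [hrun, List.takeWhile, hq, hp]
        have hrunne : run.isEmpty = false := by simp [hrun_cons]
        have hrunlen : 1 ≤ run.length := by simp [hrun_cons]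
        have hlen' : rest'.length + run.length = rest.length + 1 := by
          have := congrArg List.length hsplit
          simp only [List.length_append, List.length_cons] at this
          omega
        -- one step of loopB: consume the whole run
        have hB : loopB ((p, e) :: rest) i acc =
            loopB rest' (i + run.length)
              (if run.any (fun pe => pe.2 == 1) then runWrite run i acc
               else acc.set (i + run.length - 1) 1) := by
          rw [loopB, if_neg (show ¬ p ≠ 1 by simp [hp])]
        rw [hB]
        -- run loopA across the run
        conv_lhs => rw [← hsplit]
        rw [loopA_run run hall rest' i (-1) 0 acc, if_neg (by simp [hrunne])]
        -- head of rest' (if any) has pred ≠ 1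
        have hp' : ∀ p' e' rest'', rest' = (p', e') :: rest'' → ¬ (p' = 1) := by
          intro p' e' rest'' hre
          have h0 := List.head?_dropWhile_not q ((p, e) :: rest)
          rw [← hrest', hre] at h0
          simp only [List.head?_cons] at h0
          simpa [hq] using h0
        have hlen'' : ∀ (p' : Int × Int) rest'', rest' = p' :: rest'' → rest''.length ≤ N := by
          intro p' rest'' hre
          have := hlen'
          rw [hre] at this
          simp only [List.length_cons] at this
          simp only [List.length_cons] at hl
          omega
        by_cases hm : run.any (fun pe => pe.2 == 1) = true
        · -- matched run: lm is a nonnegative index, no corner fix on either side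
          rw [if_pos hm]
          have hlm : lm run i (-1) ≠ -1 := by
            have := lm_match run i (-1) hm
            omega
          match hre : rest' with
          | [] =>
            simp only [loopA, loopB]
            rw [if_neg (by exact fun hc => hlm hc.2)]
          | (p', e') :: rest'' =>
            have hpe := hp' p' e' rest'' rfl
            simp only [loopA, if_neg hpe]
            rw [if_neg (by exact fun hc => hlm hc.2)]
            rw [loopB, if_pos (by simpa using hpe)]
            exact ih rest'' (hlen'' _ _ rfl) (i + run.length + 1) _
        · -- matchless run: lm stays -1, the corner fix fires; runWrite is a no-op
          rw [if_neg hm]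
          have hmf : run.any (fun pe => pe.2 == 1) = false := eq_false_of_ne_true hm
          rw [lm_no_match run i (-1) hmf, runWrite_no_match run i acc hmf]
          match hre : rest' with
          | [] =>
            simp only [loopA, loopB]
            rw [if_pos (by norm_num)]
          | (p', e') :: rest'' =>
            have hpe := hp' p' e' rest'' rfl
            simp only [loopA, if_neg hpe]
            rw [if_pos (by norm_num)]
            rw [loopB, if_pos (by simpa using hpe)]
            exact ih rest'' (hlen'' _ _ rfl) (i + run.length + 1) _
      · -- not in a span: both loops just advance
        simp only [loopA, if_neg hp]
        rw [if_neg (by rintro ⟨h0, _⟩; exact absurd h0 (by norm_num))]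
        rw [loopB, if_pos (by simpa using hp)]
        simp only [List.length_cons] at hl
        exact ih rest (by omega) (i + 1) acc

-- ===== VERDICT (by name: the statement is the Claim_ definition above) =====
theorem map_span_to_event_spec : Claim_equal_map_span_to_event := by
  intro pred event _
  unfold Spec_map_span_to_event map_span_to_event map_span_to_event_alt
  exact loopA_eq_loopB (pred.zip event).length _ le_rfl 0 _
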